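-- pv_equiv track=rewrite | github.com/MrBrantCode/unitest_baseline | mut_generate/mist_train_cf/cf_77513/solution.py | count_prime_palindromes
-- ===== SOURCE A (Python) =====
-- def count_prime_palindromes(startnum, endnum):
--     def is_prime(n):
--         """Check if a number is prime."""
--         if n < 2:
--             return False
--         for i in range(2, int(n**0.5) + 1):
--             if n % i == 0:
--                 return False
--         return True
--
--     def is_palindrome(n):
--         """Check if a number is a palindrome."""
--         return str(n) == str(n)[::-1]
--
--     count = 0
--     for num in range(startnum, endnum + 1):
--         if is_prime(num) and is_palindrome(num):
--             count += 1
--     return count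
-- ===== SOURCE B (Python) =====
-- def count_prime_palindromes(startnum, endnum):
--     # Segmented sieve over [max(startnum,2), endnum], then count palindromic survivors.
--     lo = startnum if startnum > 2 else 2
--     if endnum < lo:
--         return 0
--     comp = [False] * (endnum - lo + 1)
--     i = 2
--     while i * i <= endnum:
--         first = i * i
--         m = ((lo + i - 1) // i) * i
--         if m > first:
--             first = m
--         for j in range(first, endnum + 1, i):
--             comp[j - lo] = True
--         i += 1
--     count = 0
--     for num in range(lo, endnum + 1):
--         if not comp[num - lo]:
--             s = str(num)
--             if s == s[::-1]:
--                 count += 1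
--     return count
-- ===== Notes on version B (the rewrite author's own statement) =====
-- stated objective: faster
-- what changed: Replaces A's per-number trial-division primality test with a segmented sieve of Eratosthenes over [max(startnum,2), endnum] (one boolean window, multiples of each i with i*i <= endnum marked once), then counts palindromic survivors.
import Mathlib
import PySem

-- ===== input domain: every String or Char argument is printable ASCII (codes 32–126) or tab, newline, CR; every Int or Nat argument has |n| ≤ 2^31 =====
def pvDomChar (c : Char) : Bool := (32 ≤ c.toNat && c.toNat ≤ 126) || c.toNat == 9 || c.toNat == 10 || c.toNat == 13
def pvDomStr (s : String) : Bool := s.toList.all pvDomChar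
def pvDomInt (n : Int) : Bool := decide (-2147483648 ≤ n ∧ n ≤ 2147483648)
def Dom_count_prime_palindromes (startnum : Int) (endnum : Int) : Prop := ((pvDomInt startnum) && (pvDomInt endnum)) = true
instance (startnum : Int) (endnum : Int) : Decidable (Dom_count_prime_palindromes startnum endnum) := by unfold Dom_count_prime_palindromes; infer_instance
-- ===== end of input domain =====

-- B replaces A's per-number trial division with a segmented sieve over [max(startnum,2), endnum]
-- (markedly faster; the palindrome test on survivors is unchanged).

-- ===== PORT A =====
-- 'for i in range(2, int(n**0.5)+1): if n % i == 0: return False' — the loop returns False on the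
-- first divisor found, i.e. it returns True iff no i in the range divides n, which is '.all'.
-- int(n**0.5) = Nat.sqrt n.toNat exactly for the reachable 2 ≤ n ≤ 2^31 (double sqrt of a perfect
-- square ≤ 2^52 is exact, and for non-squares in this range the error cannot cross an integer).
def pvIsPrimeA (n : Int) : Bool :=
  if n < 2 then false
  else (PySem.List.pyRange 2 (((Nat.sqrt n.toNat : Nat) : Int) + 1) 1).all
        (fun i => !(PySem.Int.mod n i == 0))

-- str(n) == str(n)[::-1]; s[::-1] is reversal (PySem.Str.slice?_none_none_neg_one)
def pvIsPalinA (n : Int) : Bool :=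
  PySem.Int.toStr n == String.ofList (PySem.Int.toStr n).toList.reverse

def count_prime_palindromes (startnum : Int) (endnum : Int) : Int :=
  (PySem.List.pyRange startnum (endnum + 1) 1).foldl
    (fun count num => if pvIsPrimeA num && pvIsPalinA num then count + 1 else count) 0

-- ===== PORT B =====
-- 'for j in range(first, endnum+1, i): comp[j-lo] = True' — on every reachable call
-- lo ≤ first ≤ j ≤ endnum, so the Python index j-lo is nonnegative and in range; .toNat is exact.
def pvMark (endnum lo i : Int) (comp : List Bool) : List Bool :=
  let first := i * i
  let m := (PySem.Int.floordiv (lo + i - 1) i) * i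
  let first := if m > first then m else first
  (PySem.List.pyRange first (endnum + 1) i).foldl (fun c j => c.set (j - lo).toNat true) comp

-- the 'while i * i <= endnum: … i += 1' loop of Source B
def pvSieve (endnum lo i : Int) (comp : List Bool) : List Bool :=
  if i * i ≤ endnum then pvSieve endnum lo (i + 1) (pvMark endnum lo i comp) else comp
termination_by (endnum + 1 - i).toNat
decreasing_by
  rename_i h
  have hi : i ≤ endnum := by
    by_cases h0 : i ≤ 0
    · nlinarith
    · nlinarith
  omega

-- comp[num - lo] : always in range (lo ≤ num ≤ endnum), so getD's default is never taken
def count_prime_palindromes_alt (startnum : Int) (endnum : Int) : Int :=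
  let lo := if startnum > 2 then startnum else 2
  if endnum < lo then 0
  else
    let comp := pvSieve endnum lo 2 (List.replicate (endnum - lo + 1).toNat false)
    (PySem.List.pyRange lo (endnum + 1) 1).foldl
      (fun count num =>
        if !(comp.getD (num - lo).toNat false) then
          if PySem.Int.toStr num == String.ofList (PySem.Int.toStr num).toList.reverse then
            count + 1
          else count
        else count) 0

-- ===== PRECONDITION & SPEC =====
def Spec_count_prime_palindromes (startnum : Int) (endnum : Int) (out : Int) : Prop := out = count_prime_palindromes_alt startnum endnum
instance (startnum : Int) (endnum : Int) (out : Int) : Decidable (Spec_count_prime_palindromes startnum endnum out) := by unfold Spec_count_prime_palindromes; infer_instance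

-- ===== CLAIM (what is proved, stated in full; the proofs are below) =====
def Claim_equal_count_prime_palindromes : Prop := ∀ (startnum : Int) (endnum : Int), Dom_count_prime_palindromes startnum endnum → Spec_count_prime_palindromes startnum endnum (count_prime_palindromes startnum endnum)

-- ===== LEMMAS AND PROOFS =====

-- n has a divisor t with i ≤ t and t² ≤ n
def pvHasDiv (i n : Int) : Prop := ∃ t : Int, i ≤ t ∧ t * t ≤ n ∧ t ∣ n

lemma pv_foldl_set_length (L : List Int) (f : Int → Nat) (comp : List Bool) :
    (L.foldl (fun c j => c.set (f j) true) comp).length = comp.length := by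
  induction L generalizing comp with
  | nil => rfl
  | cons j L ih => simpa using ih (comp.set (f j) true)

lemma pv_foldl_set_getD (L : List Int) (f : Int → Nat) (comp : List Bool) (k : Nat)
    (hk : k < comp.length) :
    (L.foldl (fun c j => c.set (f j) true) comp).getD k false
      = (comp.getD k false || L.any (fun j => f j == k)) := by
  induction L generalizing comp with
  | nil => simp
  | cons j L ih =>
    simp only [List.foldl_cons, List.any_cons]
    rw [ih (comp.set (f j) true) (by simpa using hk)]
    by_cases hjk : f j = k
    · subst hjk
      simp [List.getD_eq_getElem?_getD, hk]
    · simp only [List.getD_eq_getElem?_getD, List.getElem?_set, if_neg hjk]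
      rw [show (f j == k) = false from by simp [hjk], Bool.false_or]

lemma pv_mark_length (endnum lo i : Int) (comp : List Bool) :
    (pvMark endnum lo i comp).length = comp.length := by
  unfold pvMark; exact pv_foldl_set_length _ _ _

lemma pv_mark_getD (endnum lo i : Int) (hi : 2 ≤ i) (comp : List Bool) (k : Nat)
    (hk : k < comp.length) (hle : lo + k ≤ endnum) :
    ((pvMark endnum lo i comp).getD k false = true
      ↔ (comp.getD k false = true ∨ (i ∣ (lo + k) ∧ i * i ≤ lo + k))) := by
  have hipos : (0:Int) < i := by omega
  unfold pvMark
  simp only [PySem.Int.floordiv]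
  have hfe : (lo + i - 1).fdiv i = (lo + i - 1) / i := by
    rw [Int.fdiv_eq_ediv]; simp [le_of_lt hipos]
  rw [hfe]
  set q : Int := (lo + i - 1) / i with hq
  have hdm := Int.mul_ediv_add_emod (lo + i - 1) i
  have hmod0 : 0 ≤ (lo + i - 1) % i := Int.emod_nonneg _ (by omega)
  have hmod1 : (lo + i - 1) % i < i := Int.emod_lt_of_pos _ hipos
  have hq1 : i * q ≤ lo + i - 1 := by rw [hq]; linarith
  have hq2 : lo + i - 1 < i * q + i := by rw [hq]; linarith
  have hm_ge : lo ≤ q * i := by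
    have h := Int.lt_add_one_iff.mp (show lo < i * q + 1 by linarith)
    linarith [h, mul_comm i q]
  have hmin : ∀ t : Int, i ∣ t → lo ≤ t → q * i ≤ t := by
    rintro t ⟨c, rfl⟩ hlot
    have h1 : i * q < i * (c + 1) := by nlinarith
    have h2 : q < c + 1 := lt_of_mul_lt_mul_left h1 (le_of_lt hipos)
    have h3 : q ≤ c := by omega
    calc q * i ≤ c * i := mul_le_mul_of_nonneg_right h3 (le_of_lt hipos)
      _ = i * c := mul_comm c i
  set first : Int := if q * i > i * i then q * i else i * i with hfirst
  have hFdvd : i ∣ first := by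
    rw [hfirst]; split
    · exact ⟨q, mul_comm q i⟩
    · exact ⟨i, rfl⟩
  have hFlo : lo ≤ first := by
    rw [hfirst]; split
    · exact hm_ge
    · rename_i hnot; omega
  have hFsq : i * i ≤ first := by
    rw [hfirst]; split
    · rename_i hgt; linarith
    · exact le_refl _
  have hFmin : ∀ t : Int, i ∣ t → lo ≤ t → i * i ≤ t → first ≤ t := by
    intro t h1 h2 h3
    rw [hfirst]; split
    · exact hmin t h1 h2
    · exact h3
  rw [pv_foldl_set_getD _ _ _ k hk, Bool.or_eq_true]
  apply or_congr Iff.rfl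
  rw [List.any_eq_true]
  constructor
  · rintro ⟨j, hjmem, hjk⟩
    rw [PySem.List.mem_pyRange_iff_of_pos hipos] at hjmem
    obtain ⟨hj1, hj2, hj3⟩ := hjmem
    have hjlo : lo ≤ j := le_trans hFlo hj1
    have hjn : j = lo + (k : Int) := by
      have : (j - lo).toNat = k := by simpa using hjk
      omega
    subst hjn
    constructor
    · have : i ∣ (lo + (k:Int) - first) + first := dvd_add hj3 hFdvd
      simpa using this
    · linarith
  · rintro ⟨hdvd, hsq⟩
    refine ⟨lo + (k : Int), ?_, by simp⟩
    rw [PySem.List.mem_pyRange_iff_of_pos hipos]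
    refine ⟨hFmin _ hdvd (by omega) hsq, by omega, dvd_sub hdvd hFdvd⟩

lemma pv_sieve_getD (endnum lo : Int) (i : Int) (comp : List Bool) (hi : 2 ≤ i)
    {k : Nat} (hk : k < comp.length) (hle : lo + k ≤ endnum) :
    ((pvSieve endnum lo i comp).getD k false = true
      ↔ (comp.getD k false = true ∨ pvHasDiv i (lo + k))) := by
  induction i, comp using pvSieve.induct endnum lo generalizing k with
  | case1 i comp h ih =>
    rw [pvSieve, if_pos h]
    rw [ih (by omega) (k := k) (by rw [pv_mark_length]; exact hk) hle]
    rw [pv_mark_getD endnum lo i hi comp k hk hle]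
    have hsplit : pvHasDiv i (lo + k) ↔ (i ∣ (lo + k) ∧ i * i ≤ lo + k) ∨ pvHasDiv (i + 1) (lo + k) := by
      constructor
      · rintro ⟨t, ht1, ht2, ht3⟩
        rcases eq_or_lt_of_le ht1 with rfl | h'
        · exact Or.inl ⟨ht3, ht2⟩
        · exact Or.inr ⟨t, by omega, ht2, ht3⟩
      · rintro (⟨h1, h2⟩ | ⟨t, ht1, ht2, ht3⟩)
        · exact ⟨i, le_refl i, h2, h1⟩
        · exact ⟨t, by omega, ht2, ht3⟩
    rw [hsplit]; tauto
  | case2 i comp h =>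
    rw [pvSieve, if_neg h]
    have hno : ¬ pvHasDiv i (lo + k) := by
      rintro ⟨t, ht1, ht2, ht3⟩
      have h1 : i * i ≤ t * t := by nlinarith
      have h2 : endnum < i * i := by omega
      omega
    tauto

lemma pv_prime_iff (n : Int) (hn : 2 ≤ n) :
    (pvIsPrimeA n = true ↔ ¬ pvHasDiv 2 n) := by
  have hsqiff : ∀ t : Int, 0 < t → (t * t ≤ n ↔ t ≤ ((Nat.sqrt n.toNat : Nat) : Int)) := by
    intro t ht
    have hat : ((t.toNat : Int)) = t := Int.toNat_of_nonneg (by omega)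
    have haN : ((n.toNat : Int)) = n := Int.toNat_of_nonneg (by omega)
    constructor
    · intro h
      have h1 : t.toNat * t.toNat ≤ n.toNat := by
        have : ((t.toNat * t.toNat : Nat) : Int) ≤ ((n.toNat : Nat) : Int) := by push_cast; rw [hat, haN]; exact h
        exact_mod_cast this
      have := Nat.le_sqrt.mpr h1
      calc t = ((t.toNat : Nat) : Int) := hat.symm
        _ ≤ _ := by exact_mod_cast this
    · intro h
      have h1 : t.toNat ≤ Nat.sqrt n.toNat := by
        have : ((t.toNat : Nat) : Int) ≤ ((Nat.sqrt n.toNat : Nat) : Int) := by rw [hat]; exact h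
        exact_mod_cast this
      have h2 := Nat.le_sqrt.mp h1
      have : ((t.toNat * t.toNat : Nat) : Int) ≤ ((n.toNat : Nat) : Int) := by exact_mod_cast h2
      push_cast at this
      rw [hat, haN] at this
      exact this
  unfold pvIsPrimeA
  rw [if_neg (by omega)]
  rw [List.all_eq_true]
  constructor
  · rintro hall ⟨t, ht1, ht2, ht3⟩
    have hmem : t ∈ PySem.List.pyRange 2 (((Nat.sqrt n.toNat : Nat) : Int) + 1) 1 := by
      rw [PySem.List.mem_pyRange_one]
      exact ⟨ht1, by have := (hsqiff t (by omega)).mp ht2; omega⟩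
    have h := hall t hmem
    simp only [Bool.not_eq_eq_eq_not, Bool.not_true, beq_eq_false_iff_ne, ne_eq] at h
    exact h ((PySem.Int.mod_eq_zero_iff_dvd n t).mpr ht3)
  · intro hnone x hx
    rw [PySem.List.mem_pyRange_one] at hx
    simp only [Bool.not_eq_eq_eq_not, Bool.not_true, beq_eq_false_iff_ne, ne_eq]
    intro hmod
    exact hnone ⟨x, hx.1, (hsqiff x (by omega)).mpr (by omega), (PySem.Int.mod_eq_zero_iff_dvd n x).mp hmod⟩

theorem pv_main (startnum endnum : Int) :
    count_prime_palindromes startnum endnum = count_prime_palindromes_alt startnum endnum := by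
  unfold count_prime_palindromes count_prime_palindromes_alt
  dsimp only
  set lo : Int := if startnum > 2 then startnum else 2 with hlo
  have hlo2 : 2 ≤ lo := by rw [hlo]; split <;> omega
  have hslo : startnum ≤ lo := by rw [hlo]; split <;> omega
  have hsmall : ∀ (L : List Int), (∀ num ∈ L, num < 2) →
      L.foldl (fun count num => if pvIsPrimeA num && pvIsPalinA num then count + 1 else count) (0:Int) = 0 := by
    intro L hL
    induction L with
    | nil => rfl
    | cons x L ih =>
      have hx2 : pvIsPrimeA x = false := by unfold pvIsPrimeA; rw [if_pos (hL x (by simp))]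
      simpa [hx2] using ih (fun n hn => hL n (by simp [hn]))
  by_cases hcase : endnum < lo
  · rw [if_pos hcase]
    apply hsmall
    intro num hnum
    rw [PySem.List.mem_pyRange_one] at hnum
    by_cases hgt : startnum > 2
    · exfalso; rw [hlo, if_pos hgt] at hcase; omega
    · rw [hlo, if_neg hgt] at hcase; omega
  · rw [if_neg hcase]
    set comp := pvSieve endnum lo 2 (List.replicate (endnum - lo + 1).toNat false) with hcomp
    rw [PySem.List.pyRange_one_append startnum lo (endnum + 1) hslo (by omega), List.foldl_append]
    rw [hsmall (PySem.List.pyRange startnum lo 1) ?_]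
    swap
    · intro num hnum
      rw [PySem.List.mem_pyRange_one] at hnum
      by_cases hgt : startnum > 2
      · rw [hlo, if_pos hgt] at hnum; omega
      · rw [hlo, if_neg hgt] at hnum; omega
    apply PySem.List.foldl_congr_mem
    intro acc num hnum
    rw [PySem.List.mem_pyRange_one] at hnum
    have h2n : 2 ≤ num := by omega
    have hklen : (num - lo).toNat < (List.replicate (endnum - lo + 1).toNat false).length := by
      rw [List.length_replicate]; omega
    have hchar := pv_sieve_getD endnum lo 2 (List.replicate (endnum - lo + 1).toNat false)
      (le_refl 2) hklen (by omega)
    rw [← hcomp] at hchar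
    rw [show (List.replicate (endnum - lo + 1).toNat false).getD (num - lo).toNat false = false from by simp] at hchar
    rw [show lo + (((num - lo).toNat : Nat) : Int) = num from by omega] at hchar
    have hchar' : comp.getD (num - lo).toNat false = true ↔ pvHasDiv 2 num := by simpa using hchar
    have hprime : pvIsPrimeA num = !(comp.getD (num - lo).toNat false) := by
      cases hb : comp.getD (num - lo).toNat false
      · simp only [Bool.not_false]
        rw [pv_prime_iff num h2n]
        intro hd
        rw [hchar'.mpr hd] at hb
        simp at hb
      · simp only [Bool.not_true]
        cases hp : pvIsPrimeA num
        · rfl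
        · exact absurd (hchar'.mp hb) ((pv_prime_iff num h2n).mp hp)
    have hpal : (PySem.Int.toStr num == String.ofList (PySem.Int.toStr num).toList.reverse) = pvIsPalinA num := rfl
    rw [hpal, hprime]
    cases (comp.getD (num - lo).toNat false) <;> cases pvIsPalinA num <;> simp

-- ===== VERDICT (by name: the statement is the Claim_ definition above) =====
theorem count_prime_palindromes_spec : Claim_equal_count_prime_palindromes := by
  intro startnum endnum _
  exact pv_main startnum endnum
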